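-- pv_equiv track=rewrite | github.com/WaveGun115/Backups-GCP | SnapshotsGCP.py | validarProyectos
-- ===== SOURCE A (Python) =====
-- def validarProyectos(proyectos):
--     # Crear un diccionario para contar la frecuencia de cada proyecto
--     frecuencia_proyectos = {}
--
--     for proyecto in proyectos:
--         # Incrementar el contador para el proyecto actual en el diccionario
--         frecuencia_proyectos[proyecto] = frecuencia_proyectos.get(proyecto, 0) + 1
--
--     # Verificar si algún proyecto se repite más de una vez
--     proyecto_repetido = None
--
--     for proyecto, frecuencia in frecuencia_proyectos.items():
--         if frecuencia > 1:
--             proyecto_repetido = proyecto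
--             break
--
--     # Escribir el nombre del proyecto repetido, si hay alguno
--     if proyecto_repetido is not None:
--         return "el proyecto repetido es " + proyecto_repetido
--     else:
--         return ''
-- ===== SOURCE B (Python) =====
-- def validarProyectos(proyectos):
--     # B: no frequency dict — scan in order and test each element's total count directly.
--     for proyecto in proyectos:
--         if proyectos.count(proyecto) > 1:
--             return "el proyecto repetido es " + proyecto
--     return ''
-- ===== Notes on version B (the rewrite author's own statement) =====
-- stated objective: simpler
-- what changed: Replaces the frequency dictionary plus a second pass over dict items with a single in-order scan that tests proyectos.count(proyecto) > 1 and returns at the first hit; list order equals dict-insertion order, so the same first duplicate is reported.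
import Mathlib
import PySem

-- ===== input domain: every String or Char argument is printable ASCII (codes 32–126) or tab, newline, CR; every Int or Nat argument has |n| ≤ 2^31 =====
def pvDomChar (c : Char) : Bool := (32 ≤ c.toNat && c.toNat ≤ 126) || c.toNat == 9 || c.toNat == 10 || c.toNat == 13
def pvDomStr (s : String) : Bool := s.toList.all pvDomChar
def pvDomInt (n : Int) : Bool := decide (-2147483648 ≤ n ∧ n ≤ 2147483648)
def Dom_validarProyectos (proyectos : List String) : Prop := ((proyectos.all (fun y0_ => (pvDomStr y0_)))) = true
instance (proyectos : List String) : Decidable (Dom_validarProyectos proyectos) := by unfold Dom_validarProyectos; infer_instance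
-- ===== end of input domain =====

-- B replaces A's frequency dictionary + item scan with a single in-order scan testing each
-- element's total count (simpler); proved to return the same string on every input.


-- ===== PORT A =====
def validarProyectos (proyectos : List String) : String :=
  -- counting loop: frecuencia_proyectos[p] = frecuencia_proyectos.get(p, 0) + 1
  let frecuencia := proyectos.foldl (fun d p => d.insert p (d.getD p 0 + 1))
      (PySem.Dict.empty : PySem.Dict String Int)
  -- second loop over .items() with break = first item whose frequency exceeds 1
  let repetido := (frecuencia.items.find? (fun pf => decide (pf.2 > 1))).map (·.1)
  match repetido with
  | some p => "el proyecto repetido es " ++ p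
  | none => ""

-- ===== PORT B =====
def validarProyectos_alt (proyectos : List String) : String :=
  match proyectos.find? (fun p => decide (proyectos.count p > 1)) with
  | some p => "el proyecto repetido es " ++ p
  | none => ""

-- ===== PRECONDITION & SPEC =====
def Spec_validarProyectos (proyectos : List String) (out : String) : Prop := out = validarProyectos_alt proyectos
instance (proyectos : List String) (out : String) : Decidable (Spec_validarProyectos proyectos out) := by unfold Spec_validarProyectos; infer_instance

-- ===== CLAIM (what is proved, stated in full; the proofs are below) =====
def Claim_equal_validarProyectos : Prop := ∀ (proyectos : List String), Dom_validarProyectos proyectos → Spec_validarProyectos proyectos (validarProyectos proyectos)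

-- ===== LEMMAS AND PROOFS =====

-- find? over a Set built by foldl add: the first match in the set follows the first match
-- in the seed, then the first match among the inserted elements.
theorem find?_foldl_add {α : Type} [BEq α] [LawfulBEq α] (q : α → Bool) (xs : List α) (s : List α) :
    List.find? q (xs.foldl PySem.Set.add s) = (List.find? q s).or (List.find? q xs) := by
  induction xs generalizing s with
  | nil => simp
  | cons x xs ih =>
    simp only [List.foldl_cons, ih, List.find?_cons]
    have hadd : PySem.Set.add s x = if x ∈ s then s else s ++ [x] := by simp [PySem.Set.add]
    rw [hadd]
    split_ifs with hmem
    · cases hs : List.find? q s with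
      | some v => simp
      | none =>
        have hqx : q x = false := by
          have := List.find?_eq_none.mp hs x hmem
          simpa using this
        simp [hqx]
    · rw [List.find?_append]
      cases hs : List.find? q s with
      | some v => simp
      | none => cases hqx : q x <;> simp [List.find?, hqx]

-- first-occurrence dedup preserves the first element satisfying a predicate
theorem find?_ofList {α : Type} [BEq α] [LawfulBEq α] (q : α → Bool) (xs : List α) :
    List.find? q (PySem.Set.ofList xs) = List.find? q xs := by
  have := find?_foldl_add q xs ([] : List α)
  simpa [PySem.Set.ofList] using this

theorem validarProyectos_eq_alt (proyectos : List String) :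
    validarProyectos proyectos = validarProyectos_alt proyectos := by
  simp only [validarProyectos, validarProyectos_alt,
    PySem.Dict.foldl_insert_getD_add_one_eq_counter, PySem.Dict.items_counter,
    List.find?_map, find?_ofList]
  have hp : ((fun pf : String × Int => decide (pf.2 > 1)) ∘ (fun k => (k, (proyectos.count k : Int))))
      = (fun p => decide (proyectos.count p > 1)) := by
    funext k; simp
  rw [hp]
  cases h : List.find? (fun p => decide (proyectos.count p > 1)) proyectos <;> simp

-- ===== VERDICT (by name: the statement is the Claim_ definition above) =====
theorem validarProyectos_spec : Claim_equal_validarProyectos := by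
  intro proyectos _
  exact validarProyectos_eq_alt proyectos
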